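-- pv_equiv track=rewrite | github.com/sandahltim/RFID3 | app/services/csv_import_service.py | _categorize_pl_account
-- ===== SOURCE A (Python) =====
-- def _categorize_pl_account(account_name: str) -> str:
--     """Categorize P&L account based on name"""
--     account_lower = account_name.lower()
--
--     # Store-specific accounts (3607, 6800, 728, 8101 are store codes)
--     if account_name in ['3607', '6800', '728', '8101', '3607.1', '6800.1', '728.1', '8101.1']:
--         return 'Store Revenue'
--     elif any(word in account_lower for word in ['revenue', 'sales', 'income', 'net income']):
--         return 'Revenue'
--     elif any(word in account_lower for word in ['cogs', 'cost of goods', 'merchandise', 'repair parts', 'shop supplies']):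
--         return 'Cost of Goods Sold'
--     elif any(word in account_lower for word in ['payroll', 'wages', 'benefits', 'labor', 'contract labor']):
--         return 'Payroll & Benefits'
--     elif any(word in account_lower for word in ['rent', 'occupancy', 'facility']):
--         return 'Occupancy'
--     elif any(word in account_lower for word in ['advertising', 'marketing']):
--         return 'Marketing'
--     elif any(word in account_lower for word in ['office', 'supplies', 'admin', 'accounting', 'professional']):
--         return 'Administrative'
--     elif any(word in account_lower for word in ['loan', 'interest', 'financing', 'large equip']):
--         return 'Financing'
--     elif any(word in account_lower for word in ['fuel', 'gas', 'oil', 'freight', 'uniforms', 'repairs']):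
--         return 'Operating Expenses'
--     else:
--         return 'Other'
-- ===== SOURCE B (Python) =====
-- _STORE_CODES = frozenset(['3607', '6800', '728', '8101', '3607.1', '6800.1', '728.1', '8101.1'])
--
-- _CATEGORIES = ['Revenue', 'Cost of Goods Sold', 'Payroll & Benefits', 'Occupancy',
--                'Marketing', 'Administrative', 'Financing', 'Operating Expenses']
--
-- _KEYWORD_GROUPS = [
--     ['revenue', 'sales', 'income', 'net income'],
--     ['cogs', 'cost of goods', 'merchandise', 'repair parts', 'shop supplies'],
--     ['payroll', 'wages', 'benefits', 'labor', 'contract labor'],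
--     ['rent', 'occupancy', 'facility'],
--     ['advertising', 'marketing'],
--     ['office', 'supplies', 'admin', 'accounting', 'professional'],
--     ['loan', 'interest', 'financing', 'large equip'],
--     ['fuel', 'gas', 'oil', 'freight', 'uniforms', 'repairs'],
-- ]
--
-- # flat scoring table: every keyword with the rank of its category
-- _KEYWORD_RANK = [(kw, rank) for rank, kws in enumerate(_KEYWORD_GROUPS) for kw in kws]
--
--
-- def _categorize_pl_account(account_name: str) -> str:
--     """Categorize P&L account: score every matching keyword, keep the best rank."""
--     if account_name in _STORE_CODES:
--         return 'Store Revenue'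
--     low = account_name.lower()
--     best = min((rank for kw, rank in _KEYWORD_RANK if low.find(kw) != -1), default=None)
--     return 'Other' if best is None else _CATEGORIES[best]
-- ===== Notes on version B (the rewrite author's own statement) =====
-- stated objective: alternative
-- what changed: Replaces the ordered first-match elif cascade by a scoring pass: every keyword carries its category's rank in one flat table, all matching keywords are scored via str.find and the minimum rank (best category) is taken, with no ordered short-circuit cascade at all.
import Mathlib
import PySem

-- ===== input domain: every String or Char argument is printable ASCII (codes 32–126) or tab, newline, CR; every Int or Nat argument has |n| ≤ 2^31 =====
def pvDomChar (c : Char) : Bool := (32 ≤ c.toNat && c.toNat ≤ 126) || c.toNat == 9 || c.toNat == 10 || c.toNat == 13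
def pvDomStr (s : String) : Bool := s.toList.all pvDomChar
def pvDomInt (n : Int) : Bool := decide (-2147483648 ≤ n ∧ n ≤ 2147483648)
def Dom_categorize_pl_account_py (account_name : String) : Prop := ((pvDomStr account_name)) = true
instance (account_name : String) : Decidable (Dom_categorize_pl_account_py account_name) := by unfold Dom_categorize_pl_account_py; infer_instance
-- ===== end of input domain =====

-- B replaces the ordered elif cascade by a flat keyword→rank scoring table aggregated with min (alternative decomposition, same cost).

-- ===== PORT A =====
-- literal port of A: if/elif cascade over keyword lists
def categorize_pl_account_py (account_name : String) : String :=
  let account_lower := PySem.Str.lower account_name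
  if account_name ∈ ["3607", "6800", "728", "8101", "3607.1", "6800.1", "728.1", "8101.1"] then
    "Store Revenue"
  else if ["revenue", "sales", "income", "net income"].any (fun w => PySem.Str.isIn w account_lower) then
    "Revenue"
  else if ["cogs", "cost of goods", "merchandise", "repair parts", "shop supplies"].any (fun w => PySem.Str.isIn w account_lower) then
    "Cost of Goods Sold"
  else if ["payroll", "wages", "benefits", "labor", "contract labor"].any (fun w => PySem.Str.isIn w account_lower) then
    "Payroll & Benefits"
  else if ["rent", "occupancy", "facility"].any (fun w => PySem.Str.isIn w account_lower) then
    "Occupancy"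
  else if ["advertising", "marketing"].any (fun w => PySem.Str.isIn w account_lower) then
    "Marketing"
  else if ["office", "supplies", "admin", "accounting", "professional"].any (fun w => PySem.Str.isIn w account_lower) then
    "Administrative"
  else if ["loan", "interest", "financing", "large equip"].any (fun w => PySem.Str.isIn w account_lower) then
    "Financing"
  else if ["fuel", "gas", "oil", "freight", "uniforms", "repairs"].any (fun w => PySem.Str.isIn w account_lower) then
    "Operating Expenses"
  else
    "Other"

-- ===== PORT B =====
-- B: flat scoring — every keyword is paired with its category's rank, all matches
-- are scored via str.find and the minimum rank wins; no ordered cascade.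
def pvStoreCodes : List String :=
  PySem.Set.ofList ["3607", "6800", "728", "8101", "3607.1", "6800.1", "728.1", "8101.1"]

def pvCategories : List String :=
  ["Revenue", "Cost of Goods Sold", "Payroll & Benefits", "Occupancy",
   "Marketing", "Administrative", "Financing", "Operating Expenses"]

def pvKeywordGroups : List (List String) :=
  [["revenue", "sales", "income", "net income"],
   ["cogs", "cost of goods", "merchandise", "repair parts", "shop supplies"],
   ["payroll", "wages", "benefits", "labor", "contract labor"],
   ["rent", "occupancy", "facility"],
   ["advertising", "marketing"],
   ["office", "supplies", "admin", "accounting", "professional"],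
   ["loan", "interest", "financing", "large equip"],
   ["fuel", "gas", "oil", "freight", "uniforms", "repairs"]]

-- the comprehension [(kw, rank) for rank, kws in enumerate(groups) for kw in kws]
def pvFlatWith : Nat → List (List String) → List (String × Nat)
  | _, [] => []
  | r, g :: gs => g.map (fun kw => (kw, r)) ++ pvFlatWith (r + 1) gs

def pvKeywordRank : List (String × Nat) := pvFlatWith 0 pvKeywordGroups

def categorize_pl_account_py_alt (account_name : String) : String :=
  if PySem.Set.contains pvStoreCodes account_name then "Store Revenue"
  else
    let low := PySem.Str.lower account_name
    match PySem.List.min?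
        ((pvKeywordRank.filter (fun kp => PySem.Str.find low kp.1 != -1)).map (·.2))
        (fun x => x) with
    | none => "Other"
    | some best => pvCategories.getD best ""

-- ===== PRECONDITION & SPEC =====
def Spec_categorize_pl_account_py (account_name : String) (out : String) : Prop := out = categorize_pl_account_py_alt account_name
instance (account_name : String) (out : String) : Decidable (Spec_categorize_pl_account_py account_name out) := by unfold Spec_categorize_pl_account_py; infer_instance

-- ===== CLAIM =====
def Claim_equal_categorize_pl_account_py : Prop := ∀ (account_name : String), Dom_categorize_pl_account_py account_name → Spec_categorize_pl_account_py account_name (categorize_pl_account_py account_name)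

-- ===== LEMMAS AND PROOFS =====

theorem pvStoreCodes_mem (s : String) :
    (PySem.Set.contains pvStoreCodes s = true) ↔ s ∈ (["3607", "6800", "728", "8101", "3607.1", "6800.1", "728.1", "8101.1"] : List String) := by
  rw [show pvStoreCodes = ["3607", "6800", "728", "8101", "3607.1", "6800.1", "728.1", "8101.1"] from by decide]
  exact PySem.Set.contains_iff _ _

-- B's per-keyword test coincides with A's: low.find(kw) != -1 iff kw in low
theorem pvFind_eq_isIn (low kw : String) :
    (PySem.Str.find low kw != -1) = PySem.Str.isIn kw low := by
  by_cases hc : kw.toList <:+: low.toList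
  · have h1 := (PySem.Str.find_ne_neg_one_iff low kw).mpr hc
    have h2 := (PySem.Str.isIn_iff_infix kw low).mpr hc
    rw [h2]
    simp only [bne_iff_ne]
    simpa using h1
  · have h1 : PySem.Str.find low kw = -1 := (PySem.Str.find_eq_neg_one_iff low kw).mpr hc
    have h2 : PySem.Str.isIn kw low = false := by
      rcases hh : PySem.Str.isIn kw low with _ | _
      · rfl
      · exact absurd ((PySem.Str.isIn_iff_infix kw low).mp hh) hc
    rw [h2, h1]
    decide

-- proof-only: the cascade A computes, as a rank
def pvCascade (m : String → Bool) : Nat → List (List String) → Option Nat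
  | _, [] => none
  | r, g :: gs => if g.any m then some r else pvCascade m (r + 1) gs

theorem pvFlatWith_rank_le (r : Nat) (gs : List (List String)) :
    ∀ kp ∈ pvFlatWith r gs, r ≤ kp.2 := by
  induction gs generalizing r with
  | nil => simp [pvFlatWith]
  | cons g gs ih =>
    intro kp hkp
    simp only [pvFlatWith, List.mem_append, List.mem_map] at hkp
    rcases hkp with ⟨kw, _, rfl⟩ | h
    · exact le_refl r
    · exact Nat.le_of_succ_le (ih (r + 1) kp h)

theorem pvFoldlMin (r : Nat) (t : List Nat) (h : ∀ x ∈ t, r ≤ x) :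
    t.foldl min r = r := by
  induction t with
  | nil => rfl
  | cons x t ih =>
    have hx : min r x = r := Nat.min_eq_left (h x (by simp))
    simp only [List.foldl_cons, hx]
    exact ih (fun y hy => h y (by simp [hy]))

-- core: min rank among matching keywords of the flat table = rank of the first matching group
theorem pvMin_eq_cascade (m : String → Bool) (gs : List (List String)) (r : Nat) :
    PySem.List.min? (((pvFlatWith r gs).filter (fun kp => m kp.1)).map (·.2)) (fun x => x)
      = pvCascade m r gs := by
  induction gs generalizing r with
  | nil =>
    simp [pvFlatWith, pvCascade, PySem.List.min?_eq_none_iff]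
  | cons g gs ih =>
    have hfilt : (g.map (fun kw => (kw, r))).filter (fun kp => m kp.1)
        = (g.filter m).map (fun kw => (kw, r)) := by
      rw [List.filter_map]; rfl
    by_cases hany : g.any m
    · rcases hg : g.filter m with _ | ⟨kw0, t0⟩
      · exfalso
        rcases List.any_eq_true.mp hany with ⟨kw, hkw, hm⟩
        have : kw ∈ g.filter m := List.mem_filter.mpr ⟨hkw, hm⟩
        simp [hg] at this
      · simp only [pvFlatWith, pvCascade, hany, if_true, List.filter_append, hfilt, hg,
          List.map_cons, List.map_append, List.map_map, List.cons_append]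
        rw [PySem.List.min?_id_cons]
        congr 1
        apply pvFoldlMin
        intro x hx
        simp only [List.mem_append, List.mem_map, Function.comp] at hx
        rcases hx with ⟨kw, _, rfl⟩ | ⟨kp, hkp, rfl⟩
        · exact le_refl r
        · exact Nat.le_of_succ_le
            (pvFlatWith_rank_le (r + 1) gs kp (List.mem_of_mem_filter hkp))
    · rcases hg : g.filter m with _ | ⟨kw0, t0⟩
      · simp only [pvFlatWith, pvCascade, hany, List.filter_append, hfilt, hg,
          List.map_nil, List.nil_append]
        exact ih (r + 1)
      · exfalso
        have : kw0 ∈ g.filter m := by simp [hg]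
        have := List.mem_filter.mp this
        exact hany (List.any_eq_true.mpr ⟨kw0, this.1, this.2⟩)

-- ===== VERDICT =====
theorem categorize_pl_account_py_spec : Claim_equal_categorize_pl_account_py := by
  intro account_name _
  unfold Spec_categorize_pl_account_py categorize_pl_account_py categorize_pl_account_py_alt
  have hfun : (fun kp : String × Nat => PySem.Str.find (PySem.Str.lower account_name) kp.1 != -1)
      = (fun kp : String × Nat => PySem.Str.isIn kp.1 (PySem.Str.lower account_name)) := by
    funext kp; exact pvFind_eq_isIn _ _
  have hSCeq : pvStoreCodes = ["3607", "6800", "728", "8101", "3607.1", "6800.1", "728.1", "8101.1"] := by decide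
  by_cases hstore : account_name ∈ (["3607", "6800", "728", "8101", "3607.1", "6800.1", "728.1", "8101.1"] : List String)
  · have hm : account_name ∈ pvStoreCodes := by rw [hSCeq]; exact hstore
    simp [hstore, hm]
  · have hc : PySem.Set.contains pvStoreCodes account_name = false := by
      rcases h : PySem.Set.contains pvStoreCodes account_name with _ | _
      · rfl
      · exact absurd ((pvStoreCodes_mem account_name).mp h) hstore
    simp only [hstore, if_false, hc, Bool.false_eq_true, hfun, pvKeywordRank]
    rw [pvMin_eq_cascade (fun kw => PySem.Str.isIn kw (PySem.Str.lower account_name)) pvKeywordGroups 0]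
    simp only [pvKeywordGroups, pvCascade]
    split_ifs <;> rfl
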